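-- pv_equiv track=rewrite | github.com/Vikrant14326/LangGraph | main.py | check_prompt_injection
-- ===== SOURCE A (Python) =====
-- def check_prompt_injection(text):
--     injection_patterns = [
--         'ignore previous instructions',
--         'system prompt',
--         'you are now',
--         'forget everything',
--         'new instructions'
--     ]
--     text_lower = text.lower()
--     for pattern in injection_patterns:
--         if pattern in text_lower:
--             return False
--     return True
-- ===== SOURCE B (Python) =====
-- def check_prompt_injection(text):
--     patterns = (
--         'ignore previous instructions',
--         'system prompt',
--         'you are now',
--         'forget everything',
--         'new instructions',
--     )
--     t = text.lower()
--     # single position-major pass: at each index, test whether any phrase starts there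
--     return not any(t.startswith(p, i) for i in range(len(t) + 1) for p in patterns)
-- ===== Notes on version B (the rewrite author's own statement) =====
-- stated objective: alternative
-- what changed: Replaces A's pattern-major loop of five independent membership-substring scans with one position-major pass over the lowered text, testing at each index whether any phrase starts there via startswith, and negating an any over positions.
import Mathlib
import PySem

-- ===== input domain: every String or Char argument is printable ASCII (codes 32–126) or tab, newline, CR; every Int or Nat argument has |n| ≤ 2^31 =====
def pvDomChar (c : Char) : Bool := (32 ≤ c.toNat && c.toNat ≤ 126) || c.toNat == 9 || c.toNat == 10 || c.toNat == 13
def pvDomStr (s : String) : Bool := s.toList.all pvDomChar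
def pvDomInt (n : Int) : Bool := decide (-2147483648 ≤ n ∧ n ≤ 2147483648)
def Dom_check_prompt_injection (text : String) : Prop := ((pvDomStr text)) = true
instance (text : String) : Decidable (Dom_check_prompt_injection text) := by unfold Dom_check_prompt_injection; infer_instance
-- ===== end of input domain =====

-- B replaces A's pattern-major loop (five separate substring scans) by one
-- position-major pass testing each phrase with startswith at every index; objective: alternative.


-- ===== PORT A =====
def pvPatternsA : List String :=
  ["ignore previous instructions", "system prompt", "you are now",
   "forget everything", "new instructions"]

-- the for-loop with early 'return False'
def pvLoopA : List String → String → Bool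
  | [], _ => true
  | p :: rest, t => if PySem.Str.isIn p t then false else pvLoopA rest t

def check_prompt_injection (text : String) : Bool :=
  pvLoopA pvPatternsA (PySem.Str.lower text)

-- ===== PORT B =====
def pvPatternsB : List (List Char) :=
  ["ignore previous instructions".toList, "system prompt".toList, "you are now".toList,
   "forget everything".toList, "new instructions".toList]

-- t.startswith(p, i) is ported by hand as 'p is a prefix of t dropped at i' (exact for 0 ≤ i)
def check_prompt_injection_alt (text : String) : Bool :=
  let t := PySem.Chars.lower text.toList
  ! ((List.range (t.length + 1)).any fun i =>
      pvPatternsB.any fun p => PySem.Chars.startswith (t.drop i) p)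

-- ===== PRECONDITION & SPEC =====
def Spec_check_prompt_injection (text : String) (out : Bool) : Prop := out = check_prompt_injection_alt text
instance (text : String) (out : Bool) : Decidable (Spec_check_prompt_injection text out) := by unfold Spec_check_prompt_injection; infer_instance

-- ===== CLAIM (what is proved, stated in full; the proofs are below) =====
def Claim_equal_check_prompt_injection : Prop := ∀ (text : String), Dom_check_prompt_injection text → Spec_check_prompt_injection text (check_prompt_injection text)

-- ===== LEMMAS AND PROOFS =====

-- A's early-return loop is the negation of 'some pattern occurs'
theorem pvLoopA_eq_not_any (ps : List String) (t : String) :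
    pvLoopA ps t = ! ps.any (fun p => PySem.Str.isIn p t) := by
  induction ps with
  | nil => rfl
  | cons p rest ih =>
      simp only [pvLoopA, List.any_cons, Bool.not_or]
      by_cases h : PySem.Str.isIn p t = true <;> simp [ih]

-- the position scan for one pattern is exactly 'pattern in t'
theorem pvScan_eq_isIn (t p : List Char) :
    ((List.range (t.length + 1)).any fun i => PySem.Chars.startswith (t.drop i) p)
      = PySem.Chars.isIn p t := by
  by_cases h : PySem.Chars.isIn p t = true
  · rw [h]
    rcases (PySem.Chars.exists_prefix_drop_iff_isIn (sub := p) (s := t)).mpr h with ⟨j, hj⟩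
    simp only [List.any_eq_true, List.mem_range]
    by_cases hb : j ≤ t.length
    · exact ⟨j, by omega, (PySem.Chars.startswith_iff _ _).mpr hj⟩
    · have : t.drop j = [] := List.drop_eq_nil_of_le (by omega)
      rw [this] at hj
      have hp : p = [] := List.prefix_nil.mp hj
      exact ⟨0, by omega, (PySem.Chars.startswith_iff _ _).mpr (by simp [hp])⟩
  · rw [Bool.eq_false_iff.mpr h]
    simp only [List.any_eq_false, List.mem_range]
    intro i _ hs
    exact h ((PySem.Chars.exists_prefix_drop_iff_isIn (sub := p) (s := t)).mp
      ⟨i, (PySem.Chars.startswith_iff _ _).mp hs⟩)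

-- the two nested 'any's commute
theorem pv_any_swap {α β : Type} (xs : List α) (ys : List β) (f : α → β → Bool) :
    (xs.any fun i => ys.any fun p => f i p) = ys.any fun p => xs.any fun i => f i p := by
  rw [Bool.eq_iff_iff]
  simp only [List.any_eq_true]
  tauto

-- ===== VERDICT (by name: the statement is the Claim_ definition above) =====
theorem check_prompt_injection_spec : Claim_equal_check_prompt_injection := by
  intro text _
  show check_prompt_injection text = check_prompt_injection_alt text
  unfold check_prompt_injection check_prompt_injection_alt
  dsimp only
  rw [pvLoopA_eq_not_any, pv_any_swap]
  congr 1
  -- both sides are now 'any pattern occurs', over the two literal pattern lists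
  simp only [pvPatternsA, pvPatternsB, List.any_cons, List.any_nil,
    pvScan_eq_isIn, PySem.Str.isIn, PySem.Str.toList_lower]
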